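-- pv_equiv track=rewrite | github.com/paulklemstine/factor | v5_moonshots.py | exp11_rule30_rho
-- ===== SOURCE A (Python) =====
-- def gcd(a, b):
--     while b:
--         a, b = b, a % b
--     return a
--
-- def exp11_rule30_rho(N, p_true, q_true):
--     # Rule 30 cellular automaton for walk generation
--     width = 64
--     state = N % (2**width)
--     if state == 0: state = 1
--     x, y = 2, 2  # tortoise and hare
--     def rule30_step(s):
--         new = 0
--         for i in range(width):
--             l = (s >> ((i+1) % width)) & 1
--             c = (s >> i) & 1
--             r = (s >> ((i-1) % width)) & 1
--             # Rule 30: l XOR (c OR r)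
--             new |= (l ^ (c | r)) << i
--         return new
--     state_x = state
--     state_y = state
--     for step in range(10000):
--         state_x = rule30_step(state_x)
--         x = (x + (state_x % N)) % N
--         state_y = rule30_step(rule30_step(state_y))
--         y = (y + (state_y % N)) % N
--         g = gcd(abs(x - y), N)
--         if 1 < g < N:
--             return g
--     return None
-- ===== SOURCE B (Python) =====
-- def gcd(a, b):
--     return a if b == 0 else gcd(b, a % b)
--
-- def exp11_rule30_rho(N, p_true, q_true):
--     # Precompute the single Rule 30 CA stream with a word-level bit-parallel step,
--     # then run the rho loop by indexing it: tortoise reads entry k-1, hare entry 2k-1.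
--     MASK = (1 << 64) - 1
--
--     def step(s):
--         ror = ((s >> 1) | (s << 63)) & MASK   # left neighbour of every bit (circular)
--         rol = ((s << 1) | (s >> 63)) & MASK   # right neighbour of every bit (circular)
--         return (ror ^ (s | rol)) & MASK
--
--     s = N % (1 << 64)
--     if s == 0:
--         s = 1
--     stream = []
--     for _ in range(20000):
--         s = step(s)
--         stream.append(s)
--     x = y = 2
--     for k in range(1, 10001):
--         x = (x + stream[k - 1]) % N
--         y = (y + stream[2 * k - 1]) % N
--         g = gcd(abs(x - y), N)
--         if 1 < g < N:
--             return g
--     return None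
-- ===== Notes on version B (the rewrite author's own statement) =====
-- stated objective: alternative
-- what changed: B precomputes one shared Rule-30 CA stream as a list using a single word-level bitwise step (masked rotations: ror ^ (s | rol)) and replaces A's two parallel per-bit CA walkers by index lookups into that stream (tortoise reads entry k-1, hare entry 2k-1), fusing the two mod-N reductions per update; the stream is built eagerly, so B trades A's early exit in the CA work for cheap word-level steps.
import Mathlib
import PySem

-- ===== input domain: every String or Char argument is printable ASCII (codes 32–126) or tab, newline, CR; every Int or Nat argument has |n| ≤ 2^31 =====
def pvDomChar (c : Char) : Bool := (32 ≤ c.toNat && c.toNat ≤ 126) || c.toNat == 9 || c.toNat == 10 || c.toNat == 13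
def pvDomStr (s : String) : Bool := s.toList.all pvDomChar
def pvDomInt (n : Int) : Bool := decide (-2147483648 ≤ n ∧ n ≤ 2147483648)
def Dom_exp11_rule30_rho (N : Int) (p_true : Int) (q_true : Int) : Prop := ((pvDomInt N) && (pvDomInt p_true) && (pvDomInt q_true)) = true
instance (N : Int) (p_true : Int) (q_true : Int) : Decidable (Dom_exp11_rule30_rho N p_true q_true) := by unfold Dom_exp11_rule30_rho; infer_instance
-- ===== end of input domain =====

-- B precomputes one shared word-level Rule-30 stream as a list and runs the rho loop by
-- indexing it (tortoise entry k-1, hare entry 2k-1) instead of A's two per-bit CA walkers.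

-- shared helper: Euclid's gcd with Python's `%` (A writes it as a while loop, B as the
-- same recursion; the transliteration of both is this structural recursion)
def pvGcd (a b : Int) : Int :=
  if h : b = 0 then a else pvGcd b (PySem.Int.mod a b)
termination_by b.natAbs
decreasing_by
  rcases lt_or_gt_of_ne h with hb | hb
  · have := PySem.Int.mod_neg_bounds a hb; omega
  · have h1 := PySem.Int.mod_nonneg a hb; have h2 := PySem.Int.mod_lt a hb; omega

-- ===== PORT A =====
-- rule30_step: per-bit loop over the 64 positions, exactly as A writes it.
-- Python's `(i - 1) % width` is computed in Int; `.toNat` is exact because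
-- `mod _ 64` lies in [0, 64).
def pvRule30Step (s : Int) : Int :=
  (List.range 64).foldl (fun (new : Int) (i : Nat) =>
    let l := PySem.Int.band (s >>> ((i + 1) % 64)) 1
    let c := PySem.Int.band (s >>> i) 1
    let r := PySem.Int.band (s >>> (PySem.Int.mod ((i : Int) - 1) 64).toNat) 1
    PySem.Int.bor new (PySem.Int.bxor l (PySem.Int.bor c r) <<< i)) 0

-- the `for step in range(10000)` loop with its early return, as fuel recursion
def pvLoopA (N : Int) : Nat → Int → Int → Int → Int → Option Int
  | 0, _, _, _, _ => none
  | Nat.succ fuel, state_x, x, state_y, y =>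
    let sx' := pvRule30Step state_x
    let x' := PySem.Int.mod (x + PySem.Int.mod sx' N) N
    let sy' := pvRule30Step (pvRule30Step state_y)
    let y' := PySem.Int.mod (y + PySem.Int.mod sy' N) N
    let g := pvGcd |x' - y'| N
    if 1 < g ∧ g < N then some g else pvLoopA N fuel sx' x' sy' y'

def exp11_rule30_rho (N : Int) (p_true : Int) (q_true : Int) : Option Int :=
  let state0 := PySem.Int.mod N (2 ^ 64)
  let state := if state0 = 0 then 1 else state0
  pvLoopA N 10000 state 2 state 2

-- ===== PORT B =====
def pvMask : Int := (1 <<< 64) - 1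

-- word-level Rule 30 step: one bit-parallel rotate/mask formula
def pvStepWord (s : Int) : Int :=
  let ror := PySem.Int.band (PySem.Int.bor (s >>> (1 : Nat)) (s <<< (63 : Nat))) pvMask
  let rol := PySem.Int.band (PySem.Int.bor (s <<< (1 : Nat)) (s >>> (63 : Nat))) pvMask
  PySem.Int.band (PySem.Int.bxor ror (PySem.Int.bor s rol)) pvMask

-- `stream = []; for _ in range(20000): s = step(s); stream.append(s)`
def pvStream (s0 : Int) : List Int :=
  ((List.range 20000).foldl (fun (p : Int × List Int) _ =>
    let s' := pvStepWord p.1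
    (s', p.2 ++ [s'])) (s0, [])).2

-- `for k in range(1, 10001): …` indexing the stream; indices k-1 and 2k-1 are always
-- in range (stream has 20000 entries), so `.getD 0` is exact for Source B's `stream[…]`.
def pvLoopB (N : Int) (stream : List Int) : List Int → Int → Int → Option Int
  | [], _, _ => none
  | k :: ks, x, y =>
    let x' := PySem.Int.mod (x + (PySem.List.pyGet? stream (k - 1)).getD 0) N
    let y' := PySem.Int.mod (y + (PySem.List.pyGet? stream (2 * k - 1)).getD 0) N
    let g := pvGcd |x' - y'| N
    if 1 < g ∧ g < N then some g else pvLoopB N stream ks x' y'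

def exp11_rule30_rho_alt (N : Int) (p_true : Int) (q_true : Int) : Option Int :=
  let s0 := PySem.Int.mod N ((1 <<< 64 : Nat) : Int)
  let s := if s0 = 0 then 1 else s0
  pvLoopB N (pvStream s) (PySem.List.pyRange 1 10001 1) 2 2

-- ===== PRECONDITION & SPEC =====
-- Pre_ excludes exactly N = 0, where Python's `x % N` raises ZeroDivisionError (in both A and B).
def Pre_exp11_rule30_rho (N : Int) (p_true : Int) (q_true : Int) : Prop := N ≠ 0
instance (N : Int) (p_true : Int) (q_true : Int) : Decidable (Pre_exp11_rule30_rho N p_true q_true) := by unfold Pre_exp11_rule30_rho; infer_instance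

def pvWitness_exp11_rule30_rho : Int × Int × Int := (15, 3, 5)

def Spec_exp11_rule30_rho (N : Int) (p_true : Int) (q_true : Int) (out : Option Int) : Prop := out = exp11_rule30_rho_alt N p_true q_true
instance (N : Int) (p_true : Int) (q_true : Int) (out : Option Int) : Decidable (Spec_exp11_rule30_rho N p_true q_true out) := by unfold Spec_exp11_rule30_rho; infer_instance

-- ===== CLAIM (what is proved, stated in full; the proofs are below) =====
def Claim_equal_exp11_rule30_rho : Prop := ∀ (N : Int) (p_true : Int) (q_true : Int), Dom_exp11_rule30_rho N p_true q_true → Pre_exp11_rule30_rho N p_true q_true → Spec_exp11_rule30_rho N p_true q_true (exp11_rule30_rho N p_true q_true)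

-- ===== LEMMAS AND PROOFS =====

-- Nat-level images of the two step functions
def pvMaskN : Nat := 2 ^ 64 - 1

def pvFA (n : Nat) : Nat :=
  (List.range 64).foldl (fun (new : Nat) (i : Nat) =>
    new ||| ((((n >>> ((i + 1) % 64)) &&& 1) ^^^
      (((n >>> i) &&& 1) ||| ((n >>> ((i + 63) % 64)) &&& 1))) <<< i)) 0

def pvFB (n : Nat) : Nat :=
  ((((n >>> 1) ||| (n <<< 63)) &&& pvMaskN) ^^^
    (n ||| (((n <<< 1) ||| (n >>> 63)) &&& pvMaskN))) &&& pvMaskN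

-- the bit each position receives: left XOR (centre OR right), circular on 64 bits
def pvBitf (n j : Nat) : Bool :=
  (n.testBit ((j + 1) % 64)).xor (n.testBit j || n.testBit ((j + 63) % 64))

theorem pv_and_one (n t : Nat) : (n >>> t) &&& 1 = (n.testBit t).toNat := by
  rw [Nat.and_one_is_mod, Nat.testBit, Nat.one_and_eq_mod_two]
  rcases Nat.mod_two_eq_zero_or_one (n >>> t) with h2 | h2 <;> simp [h2]

theorem pv_testBit_toNat (b : Bool) (m : Nat) :
    (b.toNat).testBit m = (decide (m = 0) && b) := by
  cases b <;> cases m <;> simp [Nat.testBit_succ]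

theorem pv_idx_pred (i : Nat) (h : i < 64) :
    (PySem.Int.mod ((i : Int) - 1) 64).toNat = (i + 63) % 64 := by
  cases i with
  | zero => decide
  | succ j =>
    rw [PySem.Int.mod_eq_emod_of_pos (b := 64) (by norm_num)]
    omega

theorem pv_shiftR_natCast (n k : Nat) : ((n : Int) >>> k) = ((n >>> k : Nat) : Int) :=
  Int.mem_toNat?.mp rfl

theorem pv_shiftL_natCast (n k : Nat) : ((n : Int) <<< k) = ((n <<< k : Nat) : Int) :=
  Int.mem_toNat?.mp rfl

-- A's step on a nonnegative 64-bit word is the Nat fold pvFA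
theorem pv_stepA_natCast (n : Nat) : pvRule30Step (n : Int) = ((pvFA n : Nat) : Int) := by
  unfold pvRule30Step pvFA
  have main : ∀ (l : List Nat), (∀ i ∈ l, i < 64) → ∀ acc : Nat,
      List.foldl (fun (new : Int) (i : Nat) =>
        let l' := PySem.Int.band ((n : Int) >>> ((i + 1) % 64)) 1
        let c := PySem.Int.band ((n : Int) >>> i) 1
        let r := PySem.Int.band ((n : Int) >>> (PySem.Int.mod ((i : Int) - 1) 64).toNat) 1
        PySem.Int.bor new (PySem.Int.bxor l' (PySem.Int.bor c r) <<< i)) ((acc : Nat) : Int) l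
      = ((List.foldl (fun (new : Nat) (i : Nat) =>
        new ||| ((((n >>> ((i + 1) % 64)) &&& 1) ^^^
          (((n >>> i) &&& 1) ||| ((n >>> ((i + 63) % 64)) &&& 1))) <<< i)) acc l : Nat) : Int) := by
    intro l
    induction l with
    | nil => intro _ acc; simp
    | cons hd tl ih =>
      intro hmem acc
      have hhd : hd < 64 := hmem hd (List.mem_cons_self ..)
      simp only [List.foldl_cons]
      rw [show (PySem.Int.mod ((hd : Int) - 1) 64).toNat = (hd + 63) % 64 from pv_idx_pred hd hhd]
      rw [pv_shiftR_natCast, pv_shiftR_natCast, pv_shiftR_natCast]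
      rw [show (1 : Int) = ((1 : Nat) : Int) from rfl]
      rw [PySem.Int.band_natCast, PySem.Int.band_natCast, PySem.Int.band_natCast,
        PySem.Int.bor_natCast, PySem.Int.bxor_natCast, pv_shiftL_natCast,
        PySem.Int.bor_natCast]
      exact ih (fun i hi => hmem i (List.mem_cons_of_mem _ hi)) _
  have h0 : ((0 : Int)) = (((0 : Nat)) : Int) := rfl
  rw [h0, main (List.range 64) (fun i hi => List.mem_range.mp hi) 0]

-- B's step on a nonnegative 64-bit word is the Nat formula pvFB
theorem pv_stepB_natCast (n : Nat) : pvStepWord (n : Int) = ((pvFB n : Nat) : Int) := by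
  unfold pvStepWord pvFB pvMask pvMaskN
  rw [show (((1 <<< 64 : Nat) : Int) - 1) = (((2 ^ 64 - 1 : Nat)) : Int) from by
    norm_num [Nat.shiftLeft_eq]]
  simp only [pv_shiftR_natCast, pv_shiftL_natCast, PySem.Int.bor_natCast,
    PySem.Int.band_natCast, PySem.Int.bxor_natCast]

theorem pv_testBit_high (n j : Nat) (h : n < 2 ^ 64) (hj : 64 ≤ j) : n.testBit j = false :=
  Nat.testBit_eq_false_of_lt (lt_of_lt_of_le h (Nat.pow_le_pow_right (by norm_num) hj))

theorem pv_testBit_mask (j : Nat) : Nat.testBit 18446744073709551615 j = decide (j < 64) := by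
  rw [show (18446744073709551615 : Nat) = 2 ^ 64 - 1 from by norm_num, Nat.testBit_two_pow_sub_one]

-- A's fold cut off after the first k positions
def pvFAk (n k : Nat) : Nat :=
  (List.range k).foldl (fun (new : Nat) (i : Nat) =>
    new ||| ((((n >>> ((i + 1) % 64)) &&& 1) ^^^
      (((n >>> i) &&& 1) ||| ((n >>> ((i + 63) % 64)) &&& 1))) <<< i)) 0

-- bit characterisation of A's fold
theorem pv_fA_testBit (n : Nat) :
    ∀ k, k ≤ 64 → ∀ j, (pvFAk n k).testBit j = (decide (j < k) && pvBitf n j) := by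
  unfold pvFAk
  intro k
  induction k with
  | zero => intro _ j; simp
  | succ k ih =>
    intro hk j
    rw [List.range_succ, List.foldl_append, List.foldl_cons, List.foldl_nil]
    rw [Nat.testBit_or, ih (by omega) j, Nat.testBit_shiftLeft]
    rw [pv_and_one, pv_and_one, pv_and_one]
    have hb : ((n.testBit ((k + 1) % 64)).toNat ^^^
        ((n.testBit k).toNat ||| (n.testBit ((k + 63) % 64)).toNat)) = (pvBitf n k).toNat := by
      unfold pvBitf
      cases n.testBit ((k + 1) % 64) <;> cases n.testBit k <;>
        cases n.testBit ((k + 63) % 64) <;> rfl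
    rw [hb, pv_testBit_toNat]
    by_cases h1 : j < k
    · simp [h1, (by omega : j < k + 1)]
    · by_cases h2 : j = k
      · subst h2; simp
      · have e1 : j - k ≠ 0 := by omega
        have e2 : ¬ j ≤ k := by omega
        simp [h1, e1, e2]

-- bit characterisation of B's formula
theorem pv_fB_testBit (n : Nat) (h : n < 2 ^ 64) (j : Nat) :
    (pvFB n).testBit j = (decide (j < 64) && pvBitf n j) := by
  unfold pvFB pvMaskN pvBitf
  by_cases hj : j < 64
  · simp only [Nat.testBit_and, Nat.testBit_xor, Nat.testBit_or,
      Nat.testBit_shiftLeft, Nat.testBit_shiftRight, Nat.testBit_two_pow_sub_one]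
    by_cases h63 : j = 63
    · subst h63
      rw [show (1 + 63 : Nat) = 64 from rfl, pv_testBit_high n 64 h (by omega)]
      rw [pv_testBit_high n 126 h (by omega)]
      simp [show (63 + 1) % 64 = 0 from rfl, show (63 + 63) % 64 = 62 from rfl]
    · have hjj : j + 1 < 64 := by omega
      rw [show (j + 1) % 64 = j + 1 from Nat.mod_eq_of_lt hjj]
      by_cases h0 : j = 0
      · subst h0
        simp [show (0 + 63) % 64 = 63 from rfl]
      · have hw : (j + 63) % 64 = j - 1 := by omega
        rw [hw, pv_testBit_high n (63 + j) h (by omega)]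
        simp [(by omega : (1 : Nat) ≤ j), hj, Nat.add_comm 1 j]
        cases n.testBit (j + 1) <;> cases n.testBit j <;> cases n.testBit (j - 1) <;>
          first | rfl | (intro hc; omega)
  · have hd : decide (j < 64) = false := by simp [hj]
    simp [Nat.testBit_and, pv_testBit_mask, hj]

theorem pv_fA_eq_fB (n : Nat) (h : n < 2 ^ 64) : pvFA n = pvFB n := by
  have hA : pvFA n = pvFAk n 64 := rfl
  rw [hA]
  apply Nat.eq_of_testBit_eq
  intro j
  rw [pv_fB_testBit n h j]
  exact pv_fA_testBit n 64 (le_refl _) j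

theorem pv_fB_lt (n : Nat) : pvFB n < 2 ^ 64 := by
  unfold pvFB pvMaskN
  have := Nat.and_le_right (n := (((n >>> 1) ||| (n <<< 63)) &&& (2 ^ 64 - 1)) ^^^
    (n ||| (((n <<< 1) ||| (n >>> 63)) &&& (2 ^ 64 - 1)))) (m := 2 ^ 64 - 1)
  omega

-- the two steps agree on 64-bit words, and the word step stays in range
theorem pv_step_eq (s : Int) (h0 : 0 ≤ s) (h1 : s < 2 ^ 64) :
    pvRule30Step s = pvStepWord s := by
  obtain ⟨n, rfl⟩ := Int.eq_ofNat_of_zero_le h0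
  rw [pv_stepA_natCast, pv_stepB_natCast, pv_fA_eq_fB n (by exact_mod_cast h1)]

theorem pv_step_range (s : Int) (h0 : 0 ≤ s) :
    0 ≤ pvStepWord s ∧ pvStepWord s < 2 ^ 64 := by
  obtain ⟨n, rfl⟩ := Int.eq_ofNat_of_zero_le h0
  rw [pv_stepB_natCast]
  have := pv_fB_lt n
  constructor
  · exact_mod_cast Nat.zero_le _
  · exact_mod_cast this

-- iterated word step; pvIter n s0 = state of the CA after n steps
def pvIter : Nat → Int → Int
  | 0, s => s
  | n + 1, s => pvStepWord (pvIter n s)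

theorem pv_iter_range (s0 : Int) (h0 : 0 ≤ s0) (h1 : s0 < 2 ^ 64) :
    ∀ n, 0 ≤ pvIter n s0 ∧ pvIter n s0 < 2 ^ 64 := by
  intro n
  induction n with
  | zero => exact ⟨h0, h1⟩
  | succ n ih => exact pv_step_range (pvIter n s0) ih.1

-- the precomputed stream is exactly the iterates 1 .. 20000
theorem pv_stream_eq (s0 : Int) :
    pvStream s0 = (List.range 20000).map (fun i => pvIter (i + 1) s0) := by
  unfold pvStream
  have main : ∀ n, (List.range n).foldl (fun (p : Int × List Int) _ =>
      (pvStepWord p.1, p.2 ++ [pvStepWord p.1])) (s0, [])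
      = (pvIter n s0, (List.range n).map (fun i => pvIter (i + 1) s0)) := by
    intro n
    induction n with
    | zero => rfl
    | succ n ih =>
      rw [List.range_succ, List.foldl_append, ih, List.foldl_cons, List.foldl_nil,
        List.map_append]
      rfl
  rw [main 20000]

theorem pv_stream_get (s0 : Int) (m : Nat) (h : m < 20000) :
    PySem.List.pyGet? (pvStream s0) ((m : Int)) = some (pvIter (m + 1) s0) := by
  rw [PySem.List.pyGet?_natCast, pv_stream_eq]
  rw [List.getElem?_map, List.getElem?_range h]
  rfl

-- Python's (x + (s % N)) % N = (x + s) % N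
theorem pv_mod_fuse (x s N : Int) :
    PySem.Int.mod (x + PySem.Int.mod s N) N = PySem.Int.mod (x + s) N := by
  simp [PySem.Int.mod]

-- the two rho loops agree: A carries the two walker states, B reads the stream at k-1 / 2k-1
theorem pv_loop_eq (N s0 : Int) (h0 : 0 ≤ s0) (h1 : s0 < 2 ^ 64) :
    ∀ (fuel m : Nat), m + fuel = 10000 → ∀ (x y : Int),
      pvLoopA N fuel (pvIter m s0) x (pvIter (2 * m) s0) y
        = pvLoopB N (pvStream s0) (PySem.List.pyRange ((m : Int) + 1) 10001 1) x y := by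
  intro fuel
  induction fuel with
  | zero =>
    intro m hm x y
    rw [PySem.List.pyRange_one_eq_nil (by omega)]
    rfl
  | succ fuel ih =>
    intro m hm x y
    rw [PySem.List.pyRange_one_cons (by omega)]
    unfold pvLoopA pvLoopB
    simp only []
    have hrx := pv_iter_range s0 h0 h1 m
    have hry := pv_iter_range s0 h0 h1 (2 * m)
    have hry' := pv_step_range (pvIter (2 * m) s0) hry.1
    rw [pv_step_eq _ hrx.1 hrx.2, pv_step_eq _ hry.1 hry.2, pv_step_eq _ hry'.1 hry'.2,
      pv_mod_fuse, pv_mod_fuse]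
    have ex : ((m : Int) + 1 - 1) = ((m : Nat) : Int) := by ring
    have ey : (2 * ((m : Int) + 1) - 1) = (((2 * m + 1 : Nat)) : Int) := by push_cast; ring
    rw [ex, ey, pv_stream_get s0 m (by omega), pv_stream_get s0 (2 * m + 1) (by omega)]
    have hx' : pvStepWord (pvIter m s0) = pvIter (m + 1) s0 := rfl
    have hy' : pvStepWord (pvStepWord (pvIter (2 * m) s0)) = pvIter (2 * m + 1 + 1) s0 := rfl
    rw [hx', hy']
    simp only [Option.getD_some]
    split
    · rfl
    · have := ih (m + 1) (by omega) (PySem.Int.mod (x + pvIter (m + 1) s0) N)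
        (PySem.Int.mod (y + pvIter (2 * m + 1 + 1) s0) N)
      rw [show (2 * (m + 1)) = 2 * m + 1 + 1 from by omega] at this
      rw [this]
      norm_num

-- ===== VERDICT (by name: the statement is the Claim_ definition above) =====
theorem exp11_rule30_rho_spec : Claim_equal_exp11_rule30_rho := by
  intro N p_true q_true _ hN
  unfold Spec_exp11_rule30_rho exp11_rule30_rho exp11_rule30_rho_alt
  rw [show ((1 <<< 64 : Nat) : Int) = (2 ^ 64 : Int) from by norm_num [Nat.shiftLeft_eq]]
  have hpos : (0 : Int) < 2 ^ 64 := by norm_num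
  have h0 := PySem.Int.mod_nonneg N hpos
  have h1 := PySem.Int.mod_lt N hpos
  by_cases hz : PySem.Int.mod N (2 ^ 64) = 0
  · simp only [hz, if_pos]
    exact pv_loop_eq N 1 (by norm_num) (by norm_num) 10000 0 (by omega) 2 2
  · simp only [if_neg hz]
    exact pv_loop_eq N _ h0 h1 10000 0 (by omega) 2 2
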